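-- pv_equiv track=rewrite | github.com/yonglinnnnnn/Data-Structure-and-Algorithm | 212033JTopic4/Practical/flowers.py | front_H
-- ===== SOURCE A (Python) =====
-- def front_H(flowers):
--     # Put each word into the h_list or the other_list
--     h_list = []
--     other_list = []
--
--     for f in flowers:
--         if f.startswith('H'):
--             h_list.append(f)
--         else:
--             other_list.append(f)
--     return sorted(h_list) + sorted(other_list)
-- ===== SOURCE B (Python) =====
-- def front_H(flowers):
--     return sorted(flowers, key=lambda f: (not f.startswith('H'), f))
-- ===== Notes on version B (the rewrite author's own statement) =====
-- stated objective: idiomatic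
-- what changed: Replaced the explicit partition loop plus two separate sorts and a concatenation with a single stable sort using the composite key (not f.startswith('H'), f).
import Mathlib
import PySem

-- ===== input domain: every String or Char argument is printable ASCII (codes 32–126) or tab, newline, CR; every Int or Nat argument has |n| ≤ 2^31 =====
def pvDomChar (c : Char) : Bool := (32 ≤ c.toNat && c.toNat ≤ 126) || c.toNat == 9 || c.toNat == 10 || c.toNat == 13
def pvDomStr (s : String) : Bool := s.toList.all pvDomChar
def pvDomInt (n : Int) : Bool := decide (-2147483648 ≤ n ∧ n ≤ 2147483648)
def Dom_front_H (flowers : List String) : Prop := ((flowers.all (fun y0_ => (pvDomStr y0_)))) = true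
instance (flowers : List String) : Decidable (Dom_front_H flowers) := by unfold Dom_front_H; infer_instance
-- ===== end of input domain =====

-- B replaces A's partition loop + two sorts + concatenation with one stable sort on the composite key (not startswith('H'), f); same cost, more idiomatic.


-- ===== PORT A =====
def front_H (flowers : List String) : List String :=
  -- h_list / other_list accumulated by the for-loop, then sorted and concatenated
  let st := flowers.foldl
    (fun (acc : List String × List String) f =>
      if PySem.Str.startswith f "H" then (acc.1 ++ [f], acc.2) else (acc.1, acc.2 ++ [f]))
    ([], [])
  PySem.List.sorted st.1 (fun x => x) ++ PySem.List.sorted st.2 (fun x => x)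

-- ===== PORT B =====
def front_H_alt (flowers : List String) : List String :=
  PySem.List.sorted2 flowers (fun f => !(PySem.Str.startswith f "H")) (fun f => f)

-- ===== PRECONDITION & SPEC =====
def Spec_front_H (flowers : List String) (out : List String) : Prop := out = front_H_alt flowers
instance (flowers : List String) (out : List String) : Decidable (Spec_front_H flowers out) := by unfold Spec_front_H; infer_instance

-- ===== CLAIM (what is proved, stated in full; the proofs are below) =====
def Claim_equal_front_H : Prop := ∀ (flowers : List String), Dom_front_H flowers → Spec_front_H flowers (front_H flowers)

-- ===== LEMMAS AND PROOFS =====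

-- the lexicographic composite key B sorts by; injective via its second component
def pvKey (f : String) : Bool ×ₗ String := toLex (!(PySem.Str.startswith f "H"), f)

theorem pvKey_injective : Function.Injective pvKey := by
  intro a b h
  have := congrArg (fun x => (ofLex x).2) h
  simpa [pvKey] using this

-- A's partition loop computes the two filters
theorem pvPartition (fs : List String) (h o : List String) :
    fs.foldl
      (fun (acc : List String × List String) f =>
        if PySem.Str.startswith f "H" then (acc.1 ++ [f], acc.2) else (acc.1, acc.2 ++ [f]))
      (h, o)
    = (h ++ fs.filter (fun f => PySem.Str.startswith f "H"),
       o ++ fs.filter (fun f => !(PySem.Str.startswith f "H"))) := by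
  induction fs generalizing h o with
  | nil => simp
  | cons x xs ih =>
    simp only [List.foldl_cons, List.filter_cons, PySem.Str.startswith_eq, show "H".toList = ['H'] from rfl] at *
    by_cases hx : PySem.Chars.startswith x.toList ['H'] = true <;>
      simp [hx, ih]

-- B's tuple-key sort is the single-key sort by pvKey (their insertion predicates agree)
theorem pvSorted2_eq_sorted (fs : List String) :
    front_H_alt fs = PySem.List.sorted fs pvKey := by
  unfold front_H_alt PySem.List.sorted2 PySem.List.sorted
  have hb : (fun a b : String =>
        decide ((!(PySem.Str.startswith a "H")) < (!(PySem.Str.startswith b "H"))) ||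
        (!decide ((!(PySem.Str.startswith b "H")) < (!(PySem.Str.startswith a "H"))) &&
          decide (a < b)))
      = fun a b : String => decide (pvKey a < pvKey b) := by
    funext a b
    cases ha : PySem.Chars.startswith a.toList ['H'] <;>
      cases hbb : PySem.Chars.startswith b.toList ['H'] <;>
        simp [pvKey, Prod.Lex.toLex_lt_toLex, ha, hbb, Bool.lt_iff]
  simp only [hb]
  rfl

-- A's result is pairwise ≤ in pvKey
theorem pvA_pairwise (fs : List String) :
    List.Pairwise (fun a b => pvKey a ≤ pvKey b) (front_H fs) := by
  unfold front_H
  rw [pvPartition]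
  simp only [List.nil_append]
  rw [List.pairwise_append]
  refine ⟨?_, ?_, ?_⟩
  · have h := PySem.List.sorted_pairwise (fs.filter (fun f => PySem.Str.startswith f "H")) (fun x => x)
    refine h.imp_of_mem ?_
    intro a b ha hb hab
    have ha' := (List.mem_filter.mp ((PySem.List.mem_sorted _ _ _ a).mp ha)).2
    have hb' := (List.mem_filter.mp ((PySem.List.mem_sorted _ _ _ b).mp hb)).2
    simp only [PySem.Str.startswith_eq, show "H".toList = ['H'] from rfl] at ha' hb'
    simp [pvKey, Prod.Lex.toLex_le_toLex, ha', hb', hab]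
  · have h := PySem.List.sorted_pairwise (fs.filter (fun f => !(PySem.Str.startswith f "H"))) (fun x => x)
    refine h.imp_of_mem ?_
    intro a b ha hb hab
    have ha' := (List.mem_filter.mp ((PySem.List.mem_sorted _ _ _ a).mp ha)).2
    have hb' := (List.mem_filter.mp ((PySem.List.mem_sorted _ _ _ b).mp hb)).2
    simp only [PySem.Str.startswith_eq, show "H".toList = ['H'] from rfl, Bool.not_eq_eq_eq_not, Bool.not_true] at ha' hb'
    simp [pvKey, Prod.Lex.toLex_le_toLex, ha', hb', hab]
  · intro a ha b hb
    have ha' := (List.mem_filter.mp ((PySem.List.mem_sorted _ _ _ a).mp ha)).2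
    have hb' := (List.mem_filter.mp ((PySem.List.mem_sorted _ _ _ b).mp hb)).2
    simp only [PySem.Str.startswith_eq, show "H".toList = ['H'] from rfl] at ha'
    simp only [PySem.Str.startswith_eq, show "H".toList = ['H'] from rfl, Bool.not_eq_eq_eq_not, Bool.not_true] at hb'
    simp [pvKey, Prod.Lex.toLex_le_toLex, ha', hb', Bool.lt_iff]

theorem pvA_perm (fs : List String) : (front_H fs).Perm fs := by
  unfold front_H
  rw [pvPartition]
  simp only [List.nil_append]
  exact ((PySem.List.sorted_perm _ _ _).append (PySem.List.sorted_perm _ _ _)).trans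
    (List.filter_append_perm _ fs)

-- ===== VERDICT (by name: the statement is the Claim_ definition above) =====
theorem front_H_spec : Claim_equal_front_H := by
  intro flowers _
  unfold Spec_front_H
  rw [pvSorted2_eq_sorted]
  refine PySem.List.eq_of_perm_of_pairwise_le_of_injective pvKey pvKey_injective
    ?_ (pvA_pairwise flowers) (PySem.List.sorted_pairwise flowers pvKey)
  exact (pvA_perm flowers).trans (PySem.List.sorted_perm flowers pvKey _).symm
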